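-- pv_equiv track=rewrite | github.com/thcharara/cot-faithfulness | study1_corpus/scripts/study1_compute_dependencies.py | _preceding_run
-- ===== SOURCE A (Python) =====
-- def _preceding_run(
--     window: list[tuple[int, str]],
--     allowed: set[str],
--     breakers: set[str],
-- ) -> list[int]:
--     """
--     Walk backwards through window collecting sids while labels are in `allowed`.
--     Stop at the first label in `breakers` or any label not in `allowed`.
--     Returns sids in ascending order (oldest first).
--     """
--     run = []
--     for sid, lbl in reversed(window):
--         if lbl in allowed:
--             run.append(sid)
--         else:
--             break  # any non-allowed label stops the run
--     return list(reversed(run))  # oldest first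
-- ===== SOURCE B (Python) =====
-- def _preceding_run(
--     window: list[tuple[int, str]],
--     allowed: set[str],
--     breakers: set[str],
-- ) -> list[int]:
--     # Single forward pass: keep the current run of allowed labels, reset on any
--     # non-allowed label; the final run is exactly the trailing allowed suffix,
--     # already oldest-first (no reversal needed). `breakers` unused, as in A.
--     run = []
--     for sid, lbl in window:
--         if lbl in allowed:
--             run.append(sid)
--         else:
--             run = []
--     return run
-- ===== Notes on version B (the rewrite author's own statement) =====
-- stated objective: simpler
-- what changed: Replaced A's backward walk with early break plus a final reversal by a single forward pass that resets the accumulator on a non-allowed label and returns it directly without reversal.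
import Mathlib
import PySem

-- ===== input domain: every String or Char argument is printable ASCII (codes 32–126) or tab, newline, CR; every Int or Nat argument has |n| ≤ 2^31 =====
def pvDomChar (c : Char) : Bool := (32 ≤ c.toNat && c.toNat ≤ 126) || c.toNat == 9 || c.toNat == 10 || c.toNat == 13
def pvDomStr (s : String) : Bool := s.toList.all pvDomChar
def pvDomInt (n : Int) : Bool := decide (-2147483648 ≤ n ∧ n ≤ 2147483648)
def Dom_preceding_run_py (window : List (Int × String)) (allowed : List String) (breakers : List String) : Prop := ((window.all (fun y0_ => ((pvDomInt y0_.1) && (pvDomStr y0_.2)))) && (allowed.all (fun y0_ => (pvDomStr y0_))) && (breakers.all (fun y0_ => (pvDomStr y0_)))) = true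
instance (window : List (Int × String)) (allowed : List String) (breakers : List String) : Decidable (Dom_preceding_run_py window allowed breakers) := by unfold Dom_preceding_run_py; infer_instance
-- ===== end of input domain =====

-- ===== PORT A =====
-- A: walk backwards collecting sids while labels allowed, break at first other, then reverse.
def pvRunBack (allowed : List String) : List (Int × String) → List Int
  | [] => []
  | (sid, lbl) :: rest =>
      if allowed.contains lbl then sid :: pvRunBack allowed rest else []

def preceding_run_py (window : List (Int × String)) (allowed : List String) (breakers : List String) : List Int :=
  (pvRunBack allowed window.reverse).reverse

-- ===== PORT B =====
-- B: one forward pass, resetting the accumulator on a non-allowed label; no reversal.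
def preceding_run_py_alt (window : List (Int × String)) (allowed : List String) (breakers : List String) : List Int :=
  window.foldl (fun run p => if allowed.contains p.2 then run ++ [p.1] else []) []

-- ===== PRECONDITION & SPEC =====
def Spec_preceding_run_py (window : List (Int × String)) (allowed : List String) (breakers : List String) (out : List Int) : Prop := out = preceding_run_py_alt window allowed breakers
instance (window : List (Int × String)) (allowed : List String) (breakers : List String) (out : List Int) : Decidable (Spec_preceding_run_py window allowed breakers out) := by unfold Spec_preceding_run_py; infer_instance

-- ===== CLAIM (what is proved, stated in full; the proofs are below) =====
def Claim_equal_preceding_run_py : Prop := ∀ (window : List (Int × String)) (allowed : List String) (breakers : List String), Dom_preceding_run_py window allowed breakers → Spec_preceding_run_py window allowed breakers (preceding_run_py window allowed breakers)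

-- ===== LEMMAS AND PROOFS =====

-- ===== VERDICT (by name: the statement is the Claim_ definition above) =====
lemma pvRun_eq (allowed : List String) (window : List (Int × String)) :
    (pvRunBack allowed window.reverse).reverse
      = window.foldl (fun run p => if allowed.contains p.2 then run ++ [p.1] else []) [] := by
  induction window using List.reverseRecOn with
  | nil => rfl
  | append_singleton l x ih =>
      cases x with
      | mk sid lbl =>
        rw [List.reverse_append, List.foldl_append]
        by_cases h : lbl ∈ allowed <;>
          simp [pvRunBack, h, ih]

theorem preceding_run_py_spec : Claim_equal_preceding_run_py := by
  intro window allowed breakers _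
  unfold Spec_preceding_run_py preceding_run_py preceding_run_py_alt
  exact pvRun_eq allowed window
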